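-- pv_equiv track=rewrite | github.com/Diapolo10/OpenSudoku | open_sudoku/sudoku.py | join_adjacent_groups
-- ===== SOURCE A (Python) =====
-- from collections.abc import Iterable, Iterator, MutableSequence, Sequence
-- from typing import TypeVar
--
-- T = TypeVar('T')
--
-- def join_adjacent_groups(sequence: Sequence[T], group_size: int = 1) -> Iterator[tuple[T]]:
--     """Joins groups of n adjacent values to one"""
--
--     return (
--         sum(sub, start=type(sequence[0])())  # type: ignore[call-overload]
--         for sub in zip(
--             *(
--                 sequence[n::group_size]
--                 for n in range(group_size)
--             )
--         )
--     )
-- ===== SOURCE B (Python) =====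
-- def join_adjacent_groups(sequence, group_size=1):
--     """Joins groups of n adjacent values to one"""
--     buffer = []
--     for item in sequence:
--         buffer.append(item)
--         if len(buffer) == group_size:
--             yield sum(buffer, start=type(sequence[0])())
--             buffer = []
-- ===== Notes on version B (the rewrite author's own statement) =====
-- stated objective: simpler
-- what changed: A transposes group_size strided slices with zip and sums each tuple; B streams the sequence once, accumulating items in a buffer and emitting the buffer's sum each time it reaches group_size.
import Mathlib
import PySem

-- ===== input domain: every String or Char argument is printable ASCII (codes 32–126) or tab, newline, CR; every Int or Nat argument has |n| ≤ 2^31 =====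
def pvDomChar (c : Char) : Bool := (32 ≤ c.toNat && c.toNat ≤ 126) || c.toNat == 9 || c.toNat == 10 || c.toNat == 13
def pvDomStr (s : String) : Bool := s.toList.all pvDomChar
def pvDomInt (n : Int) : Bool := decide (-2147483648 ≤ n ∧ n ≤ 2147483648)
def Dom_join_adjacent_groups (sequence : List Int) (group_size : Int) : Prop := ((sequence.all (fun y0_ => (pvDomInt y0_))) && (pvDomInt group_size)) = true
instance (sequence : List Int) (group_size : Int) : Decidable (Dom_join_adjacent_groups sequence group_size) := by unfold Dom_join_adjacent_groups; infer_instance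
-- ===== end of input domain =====

-- B replaces A's transpose-of-strided-slices by a single streaming pass with a buffer (simpler); return value only — both are generators.

-- ===== PORT A =====
-- Python's variadic zip(*lists) over a list of lists, exact: zero iterables or any
-- exhausted iterable stops; otherwise emit the heads and continue on the tails.
def pvZipN (lss : List (List Int)) : List (List Int) :=
  if h : lss = [] ∨ lss.any List.isEmpty then []
  else (lss.map (fun t => t.headD 0)) :: pvZipN (lss.map List.tail)
termination_by (lss.headD []).length
decreasing_by
  rw [not_or] at h
  obtain ⟨h1, h2⟩ := h
  rcases lss with _ | ⟨l, r⟩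
  · exact absurd rfl h1
  · rcases l with _ | ⟨x, l'⟩
    · simp at h2
    · simp

-- sum(sub, start=type(sequence[0])()) is 0 + sub.sum for ints; the slice step
-- group_size is nonzero whenever a slice is actually taken (range(group_size) ≠ []),
-- so the `.getD []` arm of slice? is never the value used.
def join_adjacent_groups (sequence : List Int) (group_size : Int) : List Int :=
  (pvZipN (((PySem.List.pyRange 0 group_size 1)).map
      (fun n => (PySem.List.slice? sequence (some n) none group_size).getD []))).map
    (fun sub => 0 + sub.sum)

-- ===== PORT B =====
-- Source B: buffer = []; for item: buffer.append(item); if len(buffer) == group_size: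
--   yield sum(buffer, start=type(sequence[0])()); buffer = []
def join_adjacent_groups_alt (sequence : List Int) (group_size : Int) : List Int :=
  (sequence.foldl
    (fun (st : List Int × List Int) item =>
      let buffer := st.1 ++ [item]
      if (buffer.length : Int) = group_size then ([], st.2 ++ [0 + buffer.sum])
      else (buffer, st.2))
    ([], [])).2

-- ===== PRECONDITION & SPEC =====
def Spec_join_adjacent_groups (sequence : List Int) (group_size : Int) (out : List Int) : Prop := out = join_adjacent_groups_alt sequence group_size
instance (sequence : List Int) (group_size : Int) (out : List Int) : Decidable (Spec_join_adjacent_groups sequence group_size out) := by unfold Spec_join_adjacent_groups; infer_instance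

-- ===== CLAIM (what is proved, stated in full; the proofs are below) =====
def Claim_equal_join_adjacent_groups : Prop := ∀ (sequence : List Int) (group_size : Int), Dom_join_adjacent_groups sequence group_size → Spec_join_adjacent_groups sequence group_size (join_adjacent_groups sequence group_size)

-- ===== LEMMAS AND PROOFS =====

-- xs[n::g] for positive step g and nonnegative n, as a structural "strided" walk.
def pvStrided (g : Nat) : List Int → List Int
  | [] => []
  | y :: ys => y :: pvStrided g (ys.drop (g - 1))
termination_by ys => ys.length
decreasing_by simp only [List.length_drop, List.length_cons]; omega

-- the adjacent g-element chunks of xs, incomplete tail dropped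
def pvChunks (g : Nat) (xs : List Int) : List (List Int) :=
  if h : g = 0 ∨ xs.length < g then []
  else xs.take g :: pvChunks g (xs.drop g)
termination_by xs.length
decreasing_by
  rw [not_or] at h
  simp only [List.length_drop]
  omega

theorem pvStrided_nil (g : Nat) : pvStrided g [] = [] := by
  rw [pvStrided]

theorem pvChunks_nil (g : Nat) (xs : List Int) (h : g = 0 ∨ xs.length < g) :
    pvChunks g xs = [] := by
  rw [pvChunks, dif_pos h]

theorem pvChunks_cons (g : Nat) (xs : List Int) (h : ¬(g = 0 ∨ xs.length < g)) :
    pvChunks g xs = xs.take g :: pvChunks g (xs.drop g) := by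
  rw [pvChunks, dif_neg h]

theorem pvStrided_cons_drop (g : Nat) (hg : 1 ≤ g) (y : Int) (ys : List Int) :
    pvStrided g (y :: ys) = y :: pvStrided g ((y :: ys).drop g) := by
  rcases g with _ | g'
  · omega
  · rw [pvStrided]
    simp

-- the filterMap core of slice? for a positive step, in Nat form
theorem filterMap_strided (g : Nat) (hg : 1 ≤ g) (xs : List Int) (s : Nat) :
    List.filterMap (fun k => xs[s + g*k]?) (List.range ((xs.length - s + g - 1)/g)) =
      pvStrided g (xs.drop s) := by
  generalize hM : xs.length - s = M
  induction M using Nat.strong_induction_on generalizing s with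
  | _ M IH =>
  by_cases hs : xs.length ≤ s
  · rw [List.drop_eq_nil_of_le hs, pvStrided_nil, show M = 0 by omega, Nat.zero_add,
      Nat.div_eq_of_lt (by omega)]
    rfl
  · rw [← hM]
    have hs' : s < xs.length := by omega
    have hcount : (xs.length - s + g - 1)/g = (xs.length - s - 1)/g + 1 := by
      rw [show xs.length - s + g - 1 = (xs.length - s - 1) + g by omega,
        Nat.add_div_right _ (by omega)]
    rw [hcount, List.range_succ_eq_map, List.filterMap_cons, List.filterMap_map]
    have hf0 : xs[s + g*0]? = some xs[s] := by
      rw [Nat.mul_zero, Nat.add_zero]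
      exact List.getElem?_eq_getElem hs'
    rw [hf0]
    simp only []
    have hbody : ((fun k => xs[s + g*k]?) ∘ Nat.succ) = fun k => xs[(s+g) + g*k]? := by
      funext k
      show xs[s + g*(k+1)]? = xs[(s+g) + g*k]?
      congr 1
      ring
    rw [hbody]
    have hcnt2 : (xs.length - (s+g) + g - 1)/g = (xs.length - s - 1)/g := by
      by_cases hsg : s + g ≤ xs.length
      · congr 1
        omega
      · rw [show xs.length - (s+g) + g - 1 = g - 1 by omega,
          Nat.div_eq_of_lt (by omega), Nat.div_eq_of_lt (by omega)]
    rw [← hcnt2, IH (xs.length - (s+g)) (by omega) (s+g) rfl]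
    rw [List.drop_eq_getElem_cons hs', pvStrided_cons_drop g hg]
    congr 1
    rcases g with _ | g'
    · omega
    · rw [List.drop_succ_cons, List.drop_drop, show s + 1 + g' = s + (g'+1) by omega]

theorem slice?_eq_strided (xs : List Int) (n g : Int) (hg : 0 < g) (hn : 0 ≤ n) :
    PySem.List.slice? xs (some n) none g = some (pvStrided g.toNat (xs.drop n.toNat)) := by
  obtain ⟨gN, rfl⟩ : ∃ gN : Nat, g = (gN : Int) := ⟨g.toNat, by omega⟩
  obtain ⟨nN, rfl⟩ : ∃ nN : Nat, n = (nN : Int) := ⟨n.toNat, by omega⟩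
  have hgN : 1 ≤ gN := by exact_mod_cast hg
  simp only [PySem.List.slice?, PySem.List.sliceIndices, if_neg (by omega : ¬(gN:Int) = 0),
    if_neg (by omega : ¬(gN:Int) < 0), Int.toNat_natCast]
  rw [if_neg (show ¬((nN:Int) < 0) by omega), if_pos (show (0:Int) < (gN:Int) by omega),
    ← Nat.cast_min]
  have hbody : (fun x : Nat => xs[(((min nN xs.length : Nat):Int) + (gN:Int) * (x:Int)).toNat]?)
      = fun x : Nat => xs[min nN xs.length + gN * x]? := by
    funext x
    rw [← Nat.cast_mul, ← Nat.cast_add, Int.toNat_natCast]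
  have hcnt : (if ((min nN xs.length : Nat):Int) < (xs.length:Int) then
        (((xs.length:Int) - ((min nN xs.length : Nat):Int) + (gN:Int) - 1)/(gN:Int)).toNat else 0)
      = (xs.length - min nN xs.length + gN - 1)/gN := by
    by_cases h : min nN xs.length < xs.length
    · rw [if_pos (by exact_mod_cast h),
        show ((xs.length:Int) - ((min nN xs.length:Nat):Int) + (gN:Int) - 1)
          = ((xs.length - min nN xs.length + gN - 1 : Nat):Int) by omega,
        ← Int.natCast_div, Int.toNat_natCast]
    · rw [if_neg (by exact_mod_cast h),
        show xs.length - min nN xs.length + gN - 1 = gN - 1 by omega,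
        Nat.div_eq_of_lt (by omega)]
  rw [hbody, hcnt, filterMap_strided gN hgN xs (min nN xs.length)]
  have hdrop : xs.drop (min nN xs.length) = xs.drop nN := by
    rcases le_total nN xs.length with h | h
    · rw [min_eq_left h]
    · rw [min_eq_right h, List.drop_eq_nil_of_le (le_refl _), List.drop_eq_nil_of_le h]
  rw [hdrop]


theorem heads_take (xs : List Int) (g : Nat) (hg : g ≤ xs.length) :
    (List.range g).map (fun n => (xs.drop n).headD 0) = xs.take g := by
  induction g with
  | zero => simp
  | succ g ih =>
      rw [List.range_succ, List.map_append, ih (by omega), List.take_succ]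
      have hg' : g < xs.length := by omega
      simp [List.headD_eq_head?_getD, List.head?_drop, List.getElem?_eq_getElem hg']

theorem zipN_chunks (g : Nat) (hg : 1 ≤ g) (xs : List Int) :
    pvZipN ((List.range g).map (fun n => pvStrided g (xs.drop n))) = pvChunks g xs := by
  generalize hM : xs.length = M
  induction M using Nat.strong_induction_on generalizing xs with
  | _ M IH =>
  by_cases hlt : xs.length < g
  · rw [pvZipN, dif_pos, pvChunks_nil g xs (by omega)]
    right
    rw [List.any_eq_true]
    refine ⟨pvStrided g (xs.drop xs.length), List.mem_map.mpr ⟨xs.length, List.mem_range.mpr hlt, rfl⟩, ?_⟩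
    rw [List.drop_length, pvStrided_nil]
    rfl
  · have hge : g ≤ xs.length := by omega
    have hne : ∀ n ∈ List.range g, pvStrided g (xs.drop n) ≠ [] := by
      intro n hn
      have hn' : n < xs.length := by
        have := List.mem_range.mp hn
        omega
      rcases hd : xs.drop n with _ | ⟨y, ys⟩
      · exact absurd (List.drop_eq_nil_iff.mp hd) (by omega)
      · rw [pvStrided]
        exact List.cons_ne_nil _ _
    rw [pvZipN, dif_neg]
    · have hheads : (((List.range g).map (fun n => pvStrided g (xs.drop n))).map (fun t => t.headD 0))
          = xs.take g := by
        rw [List.map_map, ← heads_take xs g hge]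
        apply List.map_congr_left
        intro n hn
        simp only [Function.comp_apply]
        have hn' : n < xs.length := by
          have := List.mem_range.mp hn
          omega
        rcases hd : xs.drop n with _ | ⟨y, ys⟩
        · exact absurd (List.drop_eq_nil_iff.mp hd) (by omega)
        · show (pvStrided g (y :: ys)).headD 0 = (y :: ys).headD 0
          rw [pvStrided]
          rfl
      have htails : (((List.range g).map (fun n => pvStrided g (xs.drop n))).map List.tail)
          = (List.range g).map (fun n => pvStrided g ((xs.drop g).drop n)) := by
        rw [List.map_map]
        apply List.map_congr_left
        intro n hn
        simp only [Function.comp_apply]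
        have hn' : n < xs.length := by
          have := List.mem_range.mp hn
          omega
        rcases hd : xs.drop n with _ | ⟨y, ys⟩
        · exact absurd (List.drop_eq_nil_iff.mp hd) (by omega)
        · show (pvStrided g (y :: ys)).tail = pvStrided g ((xs.drop g).drop n)
          rw [pvStrided_cons_drop g hg, ← hd, List.drop_drop, List.drop_drop]
          rw [Nat.add_comm g n]
          rfl
      rw [hheads, htails, IH (xs.length - g) (by omega) (xs.drop g) (by simp),
        pvChunks_cons g xs (by omega)]
    · rw [not_or]
      constructor
      · simp only [ne_eq, List.map_eq_nil_iff, List.range_eq_nil]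
        omega
      · rw [Bool.not_eq_true, ← Bool.not_eq_true, List.any_eq_true]
        rintro ⟨l, hl, hemp⟩
        obtain ⟨n, hn, rfl⟩ := List.mem_map.mp hl
        exact hne n hn (by simpa using hemp)

theorem A_eq_chunks (xs : List Int) (g : Int) (hg : 0 < g) :
    join_adjacent_groups xs g = (pvChunks g.toNat xs).map (fun sub => 0 + sub.sum) := by
  unfold join_adjacent_groups
  rw [PySem.List.pyRange_one, Int.sub_zero, List.map_map]
  have hsl : ((fun n => (PySem.List.slice? xs (some n) none g).getD []) ∘ (fun k : Nat => (0:Int) + ↑k))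
      = fun k : Nat => pvStrided g.toNat (xs.drop k) := by
    funext k
    simp only [Function.comp_apply]
    rw [slice?_eq_strided xs ((0:Int) + ↑k) g hg (by omega)]
    rw [show ((0:Int) + (k:Int)).toNat = k by omega]
    rfl
  rw [hsl, zipN_chunks g.toNat (by omega) xs]

theorem B_invariant (g : Int) (hg : 0 < g) (xs buf out : List Int)
    (hb : (buf.length : Int) < g) :
    (xs.foldl
      (fun (st : List Int × List Int) item =>
        let buffer := st.1 ++ [item]
        if (buffer.length : Int) = g then ([], st.2 ++ [0 + buffer.sum])
        else (buffer, st.2))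
      (buf, out)).2 = out ++ (pvChunks g.toNat (buf ++ xs)).map (fun sub => 0 + sub.sum) := by
  induction xs generalizing buf out with
  | nil =>
      rw [pvChunks]
      simp only [List.foldl_nil, List.append_nil]
      rw [dif_pos (by right; omega)]
      simp
  | cons x xs ih =>
      simp only [List.foldl_cons]
      by_cases hfull : ((buf ++ [x]).length : Int) = g
      · rw [if_pos hfull]
        have hlen : (buf ++ [x]).length = g.toNat := by
          simp only [List.length_append, List.length_cons, List.length_nil] at hfull ⊢
          omega
        have hc : pvChunks g.toNat (buf ++ x :: xs) = (buf ++ [x]) :: pvChunks g.toNat xs := by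
          rw [pvChunks,
            dif_neg (by simp only [List.length_append, List.length_cons, List.length_nil] at hlen ⊢; omega),
            show buf ++ x :: xs = (buf ++ [x]) ++ xs by simp,
            List.take_left' hlen, List.drop_left' hlen]
        rw [ih [] (out ++ [0 + (buf ++ [x]).sum]) (by simpa using hg), hc]
        simp
      · rw [if_neg hfull]
        rw [ih (buf ++ [x]) out (by
          simp only [List.length_append, List.length_cons, List.length_nil] at hfull ⊢
          push_cast at hfull ⊢
          omega)]
        simp

theorem B_nonpos (g : Int) (hg : g ≤ 0) (xs buf out : List Int) :
    (xs.foldl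
      (fun (st : List Int × List Int) item =>
        let buffer := st.1 ++ [item]
        if (buffer.length : Int) = g then ([], st.2 ++ [0 + buffer.sum])
        else (buffer, st.2))
      (buf, out)).2 = out := by
  induction xs generalizing buf with
  | nil => rfl
  | cons x xs ih =>
      simp only [List.foldl_cons]
      rw [if_neg (by simp only [List.length_append, List.length_cons]; push_cast; omega)]
      exact ih _

-- ===== VERDICT (by name: the statement is the Claim_ definition above) =====
theorem join_adjacent_groups_spec : Claim_equal_join_adjacent_groups := by
  intro xs g _
  unfold Spec_join_adjacent_groups join_adjacent_groups_alt
  by_cases hg : 0 < g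
  · rw [B_invariant g hg xs [] [] (by simpa using hg), A_eq_chunks xs g hg]
    simp
  · push_neg at hg
    rw [B_nonpos g hg]
    unfold join_adjacent_groups
    rw [PySem.List.pyRange_one_eq_nil (by omega)]
    simp [pvZipN]
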